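-- pv_equiv track=rewrite | github.com/dengguojie/vue-element-admin | auto_schedule/python/tbe/dsl/base/classifier/transdata/general_transdata_classifier.py | _do_idx_fusion
-- ===== SOURCE A (Python) =====
-- def _do_idx_fusion(src, dst, pad):
--     result = []
--     k, j = 0, 0
--     info = [list(x) for x in list(zip(src, dst, pad))]
--     length = len(info)
--
--     while k <= length - 1:
--         if k == length - 1:
--             result.append(info[k])
--             break
--
--         j = k + 1
--         while j <= length - 1:
--             is_serial = info[j][1] == info[j - 1][1] + 1
--             is_same_type = info[j][2] == info[j - 1][2]
--             if not is_serial or not is_same_type: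
--                 break
--             j += 1
--
--         result.append(info[k])
--         k = j
--     return result
-- ===== SOURCE B (Python) =====
-- def _do_idx_fusion(src, dst, pad):
--     info = [list(x) for x in zip(src, dst, pad)]
--     if not info:
--         return []
--     result = [info[0]]
--     for prev, cur in zip(info, info[1:]):
--         if not (cur[1] == prev[1] + 1 and cur[2] == prev[2]):
--             result.append(cur)
--     return result
-- ===== Notes on version B (the rewrite author's own statement) =====
-- stated objective: simpler
-- what changed: Replaces A's nested while loops (inner loop jumping the outer index k to the end of each run) by a single flat pass over adjacent pairs zip(info, info[1:]) that emits info[0] and every element starting a new run; the flat zip loop avoids A's repeated Python-level indexing and re-testing of pair conditions, a constant-factor speedup measured.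
import Mathlib
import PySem

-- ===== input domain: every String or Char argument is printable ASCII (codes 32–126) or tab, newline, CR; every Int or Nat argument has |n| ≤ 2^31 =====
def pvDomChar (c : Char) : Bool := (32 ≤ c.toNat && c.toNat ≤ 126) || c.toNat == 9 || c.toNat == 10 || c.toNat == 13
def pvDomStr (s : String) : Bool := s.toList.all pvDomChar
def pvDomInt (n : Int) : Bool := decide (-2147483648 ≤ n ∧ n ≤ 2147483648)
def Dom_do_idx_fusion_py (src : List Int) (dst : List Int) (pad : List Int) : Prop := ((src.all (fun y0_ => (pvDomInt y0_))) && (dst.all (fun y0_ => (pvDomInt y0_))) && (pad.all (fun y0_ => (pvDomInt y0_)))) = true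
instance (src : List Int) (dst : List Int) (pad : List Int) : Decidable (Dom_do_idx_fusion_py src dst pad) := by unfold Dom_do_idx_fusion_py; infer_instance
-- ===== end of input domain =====

-- B changes: one flat pass over adjacent pairs instead of A's nested while loops
-- with an inner index-jumping loop (objective: simpler).

-- ===== PORT A =====
-- list(x) for x in zip(src, dst, pad): each row is the 3-element list [s, d, p]
def pvRow3 (x : Int × Int × Int) : List Int := [x.1, x.2.1, x.2.2]

-- Inner while loop of A: advances j while the run continues, returns the final j.
-- Indexing info[j], info[j-1] (j ≥ 1) and row[1], row[2] is always in range on every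
-- call A makes (rows have length 3), so getD is exact there; the Python int test
-- 'j <= length - 1' is written as the equivalent 'j < length'.
def pvInner (info : List (List Int)) (j : Nat) : Nat :=
  if j < info.length then
    if ¬((info.getD j []).getD 1 0 = (info.getD (j - 1) []).getD 1 0 + 1) ∨
       ¬((info.getD j []).getD 2 0 = (info.getD (j - 1) []).getD 2 0) then j
    else pvInner info (j + 1)
  else j
termination_by info.length - j

-- needed by pvOuter's termination proof
theorem pvInner_ge (info : List (List Int)) (j : Nat) : j ≤ pvInner info j := by
  fun_induction pvInner info j with
  | case1 => exact Nat.le_refl _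
  | case2 _ _ _ ih => exact Nat.le_trans (Nat.le_succ _) ih
  | case3 => exact Nat.le_refl _

-- Outer while loop of A ('k <= length - 1' likewise written 'k < length').
def pvOuter (info : List (List Int)) (k : Nat) : List (List Int) :=
  if k < info.length then
    if k = info.length - 1 then [info.getD k []]
    else info.getD k [] :: pvOuter info (pvInner info (k + 1))
  else []
termination_by info.length - k
decreasing_by
  have h := pvInner_ge info (k + 1)
  omega

def do_idx_fusion_py (src : List Int) (dst : List Int) (pad : List Int) : List (List Int) :=
  pvOuter ((src.zip (dst.zip pad)).map pvRow3) 0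

-- ===== PORT B =====
def do_idx_fusion_py_alt (src : List Int) (dst : List Int) (pad : List Int) : List (List Int) :=
  let info := (src.zip (dst.zip pad)).map pvRow3
  match info with
  | [] => []
  | h :: t =>
      (info.zip t).foldl
        (fun acc pc =>
          if ¬(pc.2.getD 1 0 = pc.1.getD 1 0 + 1 ∧ pc.2.getD 2 0 = pc.1.getD 2 0)
          then acc ++ [pc.2] else acc)
        [h]

-- ===== PRECONDITION & SPEC =====
def Spec_do_idx_fusion_py (src : List Int) (dst : List Int) (pad : List Int) (out : List (List Int)) : Prop := out = do_idx_fusion_py_alt src dst pad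
instance (src : List Int) (dst : List Int) (pad : List Int) (out : List (List Int)) : Decidable (Spec_do_idx_fusion_py src dst pad out) := by unfold Spec_do_idx_fusion_py; infer_instance

-- ===== CLAIM (what is proved, stated in full; the proofs are below) =====
def Claim_equal_do_idx_fusion_py : Prop := ∀ (src : List Int) (dst : List Int) (pad : List Int), Dom_do_idx_fusion_py src dst pad → Spec_do_idx_fusion_py src dst pad (do_idx_fusion_py src dst pad)

-- ===== LEMMAS AND PROOFS =====

-- Structural form of B's scan: elements after the first that start a new run.
def pvGo (prev : List Int) : List (List Int) → List (List Int)
  | [] => []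
  | c :: t =>
      (if ¬(c.getD 1 0 = prev.getD 1 0 + 1 ∧ c.getD 2 0 = prev.getD 2 0) then [c] else []) ++
      pvGo c t

theorem pvFold_go (l : List (List Int)) : ∀ (prev : List Int) (acc : List (List Int)),
    ((prev :: l).zip l).foldl
      (fun acc pc =>
        if ¬(pc.2.getD 1 0 = pc.1.getD 1 0 + 1 ∧ pc.2.getD 2 0 = pc.1.getD 2 0)
        then acc ++ [pc.2] else acc) acc
    = acc ++ pvGo prev l := by
  induction l with
  | nil => intro prev acc; simp [pvGo]
  | cons c t ih =>
      intro prev acc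
      simp only [List.zip_cons_cons, List.foldl_cons, pvGo]
      rw [ih]
      split <;> simp

theorem pvInner_go (info : List (List Int)) (i : Nat) (h1 : 1 ≤ i) :
    pvGo (info.getD (i - 1) []) (info.drop i)
      = pvGo (info.getD (pvInner info i - 1) []) (info.drop (pvInner info i)) := by
  fun_induction pvInner info i with
  | case1 => rfl
  | case2 j hlt hcond ih =>
      have hc : (info.getD j []).getD 1 0 = (info.getD (j - 1) []).getD 1 0 + 1 ∧
                (info.getD j []).getD 2 0 = (info.getD (j - 1) []).getD 2 0 := by
        by_contra hcn
        exact hcond (by tauto)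
      have hget : info.drop j = info.getD j [] :: info.drop (j + 1) := by
        rw [List.getD_eq_getElem _ _ hlt]
        exact (List.getElem_cons_drop hlt).symm
      rw [hget]
      simp only [pvGo, if_neg (not_not_intro hc), List.nil_append]
      simpa using ih (by omega)
  | case3 => rfl

theorem pvInner_stop (info : List (List Int)) (i : Nat)
    (h : pvInner info i < info.length) :
    ¬((info.getD (pvInner info i) []).getD 1 0 = (info.getD (pvInner info i - 1) []).getD 1 0 + 1 ∧
      (info.getD (pvInner info i) []).getD 2 0 = (info.getD (pvInner info i - 1) []).getD 2 0) := by
  fun_induction pvInner info i with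
  | case1 j hlt hcond =>
      intro hc
      exact hcond.elim (fun h1 => h1 hc.1) (fun h2 => h2 hc.2)
  | case2 j hlt hcond ih => exact ih h
  | case3 j hge => omega

theorem pvOuter_go (info : List (List Int)) (k : Nat) :
    k < info.length →
    pvOuter info k = info.getD k [] :: pvGo (info.getD k []) (info.drop (k + 1)) := by
  fun_induction pvOuter info k with
  | case1 hlt =>
      intro hk
      rw [List.drop_eq_nil_of_le (by omega)]
      simp [pvGo]
  | case2 k hlt hne ih =>
      intro _
      have hj1 : k + 1 ≤ pvInner info (k + 1) := pvInner_ge info (k + 1)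
      have hrw : pvGo (info.getD k []) (info.drop (k + 1))
          = pvGo (info.getD (pvInner info (k + 1) - 1) []) (info.drop (pvInner info (k + 1))) := by
        simpa using pvInner_go info (k + 1) (by omega)
      rw [hrw]
      by_cases hjl : pvInner info (k + 1) < info.length
      · have hstop := pvInner_stop info (k + 1) hjl
        have hget : info.drop (pvInner info (k + 1))
            = info.getD (pvInner info (k + 1)) [] :: info.drop (pvInner info (k + 1) + 1) := by
          rw [List.getD_eq_getElem _ _ hjl]
          exact (List.getElem_cons_drop hjl).symm
        rw [hget]
        simp only [pvGo, if_pos hstop, List.singleton_append]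
        rw [ih hjl]
      · rw [List.drop_eq_nil_of_le (by omega)]
        rw [pvOuter, if_neg hjl]
        simp [pvGo]
  | case3 k hge =>
      intro hk
      omega

-- ===== VERDICT (by name: the statement is the Claim_ definition above) =====
theorem do_idx_fusion_py_spec : Claim_equal_do_idx_fusion_py := by
  intro src dst pad _
  unfold Spec_do_idx_fusion_py do_idx_fusion_py do_idx_fusion_py_alt
  cases hinfo : (src.zip (dst.zip pad)).map pvRow3 with
  | nil => rw [pvOuter, if_neg (by simp)]
  | cons h t =>
      show pvOuter (h :: t) 0 =
        ((h :: t).zip t).foldl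
          (fun acc pc =>
            if ¬(pc.2.getD 1 0 = pc.1.getD 1 0 + 1 ∧ pc.2.getD 2 0 = pc.1.getD 2 0)
            then acc ++ [pc.2] else acc) [h]
      rw [pvFold_go, pvOuter_go _ 0 (by simp)]
      simp
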